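-- pv_equiv track=rewrite | github.com/pypi-data/pypi-mirror-68 | packages/pyloader/pyloader-0.1.5.tar.gz/pyloader-0.1.5/pyloader/parser.py | parse
-- ===== SOURCE A (Python) =====
-- def parse(args):
--     _args1 = []
--     _args2 = []
--     kw = {}
--     key = None
--     for arg in args:
--         if arg.startswith('-'):
--             if key:
--                 raise Exception
--             if arg.startswith('--'):
--                 if arg.startswith('---'):
--                     raise Exception
--                 arg = arg.lstrip('-')
--                 if '=' in arg:
--                     key, value = arg.split('=', 1)
--                     kw[key] = value
--                     key = None
--                 else:
--                     key = arg
--             else: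
--                 _args2.append(arg[1:])
--         else:
--             if key:
--                 kw[key] = arg
--                 key = None
--             else:
--                 _args1.append(arg)
--     if key:
--         raise Exception
--     return _args1, _args2, kw
-- ===== SOURCE B (Python) =====
-- def parse(args):
--     pos, flags, kw = [], [], {}
--     i = 0
--     n = len(args)
--     while i < n:
--         arg = args[i]
--         if not arg.startswith('-'):
--             pos.append(arg)
--             i += 1
--         elif not arg.startswith('--'):
--             flags.append(arg[1:])
--             i += 1
--         elif arg.startswith('---'):
--             raise Exception
--         else:
--             body = arg.lstrip('-')
--             if '=' in body:
--                 k, v = body.split('=', 1)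
--                 kw[k] = v
--                 i += 1
--             elif body:
--                 if i + 1 >= n or args[i + 1].startswith('-'):
--                     raise Exception
--                 kw[body] = args[i + 1]
--                 i += 2
--             else:
--                 i += 1
--     return pos, flags, kw
-- ===== Notes on version B (the rewrite author's own statement) =====
-- stated objective: alternative
-- what changed: Replaced the carried 'key' state variable threaded through a for-loop (with a post-loop dangling-key check) by an index-based while loop that resolves each '--long' option immediately with a lookahead at args[i+1], consuming one or two tokens per step and never holding parser state between iterations.
import Mathlib
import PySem

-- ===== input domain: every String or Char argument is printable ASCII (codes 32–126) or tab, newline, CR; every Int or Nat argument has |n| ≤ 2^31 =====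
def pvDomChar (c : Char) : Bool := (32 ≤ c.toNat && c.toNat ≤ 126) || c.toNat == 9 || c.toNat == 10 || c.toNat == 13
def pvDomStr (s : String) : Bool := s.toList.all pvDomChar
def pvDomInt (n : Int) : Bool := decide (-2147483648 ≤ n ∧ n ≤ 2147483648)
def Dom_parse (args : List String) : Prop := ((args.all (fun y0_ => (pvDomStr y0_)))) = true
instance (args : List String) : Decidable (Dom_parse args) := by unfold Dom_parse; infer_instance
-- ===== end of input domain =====

-- B replaces A's carried 'key' state (for-loop + post-loop dangling check) by an index/lookahead
-- while-loop that resolves each '--long' option immediately, consuming one or two tokens per step;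
-- objective: alternative decomposition. Pre_parse excludes exactly the inputs on which A raises.


-- ===== PORT A =====
-- s.lstrip('-') : exact, lstrip with the single-char set {'-'} drops exactly the leading '-' chars
def dashStrip (s : String) : String := String.mk (s.toList.dropWhile (· == '-'))

-- Python truthiness of the 'key' variable (None or a str): falsy iff None or ""
def pyTruthy (k : Option String) : Bool := match k with | none => false | some s => s ≠ ""

-- the for-loop of A over the remaining args, state (_args1, _args2, kw, key);
-- where the Python raises, returns the dummy ([], [], []) (such inputs are outside Pre_parse)
def parseGo : List String → List String → List String → PySem.Dict String String → Option String →
    List String × List String × (List (String × String))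
  | [], a1, a2, kw, key =>
      if pyTruthy key then ([], [], []) else (a1, a2, kw.items)
  | arg :: rest, a1, a2, kw, key =>
      if PySem.Str.startswith arg "-" then
        if pyTruthy key then ([], [], [])
        else if PySem.Str.startswith arg "--" then
          if PySem.Str.startswith arg "---" then ([], [], [])
          else
            let arg' := dashStrip arg
            if PySem.Str.isIn "=" arg' then
              match PySem.Str.splitMax? arg' "=" 1 with
              | some (k :: v :: _) => parseGo rest a1 a2 (kw.insert k v) none
              | _ => ([], [], [])
            else parseGo rest a1 a2 kw (some arg')
        else parseGo rest a1 (a2 ++ [String.mk (PySem.Chars.slice arg.toList (some 1) none)]) kw key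
      else
        if pyTruthy key then
          match key with
          | some k => parseGo rest a1 a2 (kw.insert k arg) none
          | none => ([], [], [])
        else parseGo rest (a1 ++ [arg]) a2 kw key

def parse (args : List String) : List String × List String × (List (String × String)) :=
  parseGo args [] [] PySem.Dict.empty none

-- ===== PORT B =====
-- the while-loop of B: consumes one or two tokens per step, no carried key state;
-- where the Python raises, returns the dummy ([], [], [])
def parseAltGo : List String → List String → List String → PySem.Dict String String →
    List String × List String × (List (String × String))
  | [], pos, flags, kw => (pos, flags, kw.items)
  | arg :: rest, pos, flags, kw =>
      if ¬ PySem.Str.startswith arg "-" then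
        parseAltGo rest (pos ++ [arg]) flags kw
      else if ¬ PySem.Str.startswith arg "--" then
        parseAltGo rest pos (flags ++ [String.mk (PySem.Chars.slice arg.toList (some 1) none)]) kw
      else if PySem.Str.startswith arg "---" then ([], [], [])
      else
        let body := dashStrip arg
        if PySem.Str.isIn "=" body then
          match PySem.Str.splitMax? body "=" 1 with
          | some (k :: v :: _) => parseAltGo rest pos flags (kw.insert k v)
          | _ => ([], [], [])
        else if body ≠ "" then
          match rest with
          | [] => ([], [], [])
          | b :: rest2 =>
            if PySem.Str.startswith b "-" then ([], [], [])
            else parseAltGo rest2 pos flags (kw.insert body b)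
        else parseAltGo rest pos flags kw
  termination_by l => l.length
  decreasing_by all_goals simp

def parse_alt (args : List String) : List String × List String × (List (String × String)) :=
  parseAltGo args [] [] PySem.Dict.empty

-- ===== PRECONDITION & SPEC =====
-- Pre_parse excludes exactly the inputs on which the Python A raises Exception: a token starting
-- with '---', or a key-introducing '--key' token (no '=', nonempty key) not followed by a
-- non-dash value token.
def preB : List String → Bool
  | [] => true
  | arg :: rest =>
      !(PySem.Str.startswith arg "---") &&
      (if PySem.Str.startswith arg "--" && !(PySem.Str.isIn "=" (dashStrip arg))
          && !(dashStrip arg == "") then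
         match rest with
         | [] => false
         | b :: _ => !(PySem.Str.startswith b "-")
       else true) &&
      preB rest

def Pre_parse (args : List String) : Prop := preB args = true
instance (args : List String) : Decidable (Pre_parse args) := by unfold Pre_parse; infer_instance

def pvWitness_parse : List String := ["a", "-v", "--k=1", "--key", "val"]

def Spec_parse (args : List String) (out : List String × List String × (List (String × String))) : Prop := out = parse_alt args
instance (args : List String) (out : List String × List String × (List (String × String))) : Decidable (Spec_parse args out) := by unfold Spec_parse; infer_instance

-- ===== CLAIM (what is proved, stated in full; the proofs are below) =====
def Claim_equal_parse : Prop := ∀ (args : List String), Dom_parse args → Pre_parse args → Spec_parse args (parse args)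

-- ===== LEMMAS AND PROOFS =====
theorem parseGo_eq_alt (n : Nat) : ∀ (l a1 a2 : List String) (kw : PySem.Dict String String)
    (key : Option String), l.length ≤ n → pyTruthy key = false → preB l = true →
    parseGo l a1 a2 kw key = parseAltGo l a1 a2 kw := by
  induction n with
  | zero =>
    intro l a1 a2 kw key hlen hk hp
    cases l with
    | nil => simp [parseGo, parseAltGo, hk]
    | cons a t => simp at hlen
  | succ n ih =>
    intro l a1 a2 kw key hlen hk hp
    cases l with
    | nil => simp [parseGo, parseAltGo, hk]
    | cons arg rest =>
      simp only [List.length_cons, Nat.add_le_add_iff_right] at hlen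
      simp only [preB, Bool.and_eq_true, Bool.not_eq_true'] at hp
      have h1 := hp.1.1
      have h2 := hp.1.2
      have h3 := hp.2
      clear hp
      rw [parseGo.eq_def, parseAltGo.eq_def]
      by_cases hd : PySem.Str.startswith arg "-" = true
      case neg =>
        simp only [hd, hk, Bool.false_eq_true, if_false, not_false_eq_true, if_true]
        exact ih rest (a1 ++ [arg]) a2 kw key hlen hk h3
      case pos =>
      by_cases hdd : PySem.Str.startswith arg "--" = true
      case neg =>
        simp only [hd, hdd, hk, Bool.false_eq_true, if_false, if_true, not_false_eq_true,
          not_true_eq_false]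
        exact ih rest a1
          (a2 ++ [String.mk (PySem.Chars.slice arg.toList (some 1) none)]) kw key hlen hk h3
      case pos =>
      by_cases he : PySem.Str.isIn "=" (dashStrip arg) = true
      case pos =>
        simp only [hd, hdd, h1, he, hk, Bool.false_eq_true, if_false, if_true,
          not_true_eq_false]
        cases hsp : PySem.Str.splitMax? (dashStrip arg) "=" 1 with
        | none => simp
        | some parts =>
          match parts with
          | [] => simp
          | [k] => simp
          | k :: v :: t =>
            simp only [hsp]
            exact ih rest a1 a2 (kw.insert k v) none hlen rfl h3
      case neg =>
      by_cases hb : dashStrip arg = ""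
      case pos =>
        simp only [hd, hdd, h1, hk, Bool.false_eq_true, if_false, if_true, not_true_eq_false]
        rw [if_neg he, if_neg (show ¬(dashStrip arg ≠ "") from fun h => h hb), if_neg he]
        exact ih rest a1 a2 kw (some (dashStrip arg)) hlen (by simp [pyTruthy, hb]) h3
      case neg =>
        rw [if_pos ⟨⟨hdd, by simpa using he⟩, by simpa using hb⟩] at h2
        cases rest with
        | nil => simp at h2
        | cons b rest2 =>
          have hb2 : PySem.Str.startswith b "-" = false := by simpa using h2
          have h3' : preB rest2 = true := by
            simp only [preB, Bool.and_eq_true] at h3; exact h3.2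
          simp only [hd, hdd, h1, he, hk, Bool.false_eq_true, if_false, if_true,
            not_true_eq_false, ne_eq, hb, not_false_eq_true, hb2]
          rw [parseGo.eq_def]
          simp only [hb2, Bool.false_eq_true, if_false]
          have ht : pyTruthy (some (dashStrip arg)) = true := by simp [pyTruthy, hb]
          simp only [ht, if_true]
          exact ih rest2 a1 a2 (kw.insert (dashStrip arg) b) none
            (by simp at hlen ⊢; omega) rfl h3'

-- ===== VERDICT (by name: the statement is the Claim_ definition above) =====
theorem parse_spec : Claim_equal_parse := by
  intro args _ hpre
  unfold Spec_parse parse parse_alt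
  exact parseGo_eq_alt args.length args [] [] PySem.Dict.empty none (le_refl _) rfl hpre
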